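-- pv_equiv track=rewrite | github.com/LauraDiao/CKD-modeling | ckd_prediction.py | monotonic_labels
-- ===== SOURCE A (Python) =====
-- def monotonic_labels(labels):
--     monotonic = []
--     has_progressed = False
--     for lab in labels:
--         if lab == 1:
--             has_progressed = True
--         monotonic.append(1 if has_progressed else 0)
--     return monotonic
-- ===== SOURCE B (Python) =====
-- def monotonic_labels(labels):
--     labels = list(labels)
--     idx = next((i for i, l in enumerate(labels) if l == 1), None)
--     if idx is None:
--         return [0] * len(labels)
--     return [0] * idx + [1] * (len(labels) - idx)
-- ===== Notes on version B (the rewrite author's own statement) =====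
-- stated objective: alternative
-- what changed: Instead of a single pass appending a per-element flag value, B locates the index of the first progressed label and constructs the output as two homogeneous runs (a zero run followed by a one run).
import Mathlib
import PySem

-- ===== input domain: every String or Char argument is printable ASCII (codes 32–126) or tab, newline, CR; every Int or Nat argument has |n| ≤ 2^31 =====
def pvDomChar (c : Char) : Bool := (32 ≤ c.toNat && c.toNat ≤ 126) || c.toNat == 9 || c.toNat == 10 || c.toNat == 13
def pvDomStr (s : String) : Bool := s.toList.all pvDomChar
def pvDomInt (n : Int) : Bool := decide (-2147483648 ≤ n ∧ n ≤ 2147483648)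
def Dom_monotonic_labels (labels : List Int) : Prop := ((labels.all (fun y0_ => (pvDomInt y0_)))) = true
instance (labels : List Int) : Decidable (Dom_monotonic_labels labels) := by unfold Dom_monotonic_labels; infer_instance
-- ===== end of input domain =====

-- B builds the output as two homogeneous runs from the index of the first progressed label, instead of A's per-element flag pass (objective: alternative decomposition).

-- ===== PORT A =====
-- single pass keeping the has_progressed flag and the accumulated list
def monotonic_labels (labels : List Int) : List Int :=
  (labels.foldl
    (fun (st : List Int × Bool) lab =>
      let hp := if lab == 1 then true else st.2
      (st.1 ++ [if hp then 1 else 0], hp))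
    ([], false)).1

-- ===== PORT B =====
def monotonic_labels_alt (labels : List Int) : List Int :=
  match labels.findIdx? (fun l => l == 1) with
  | none => List.replicate labels.length 0
  | some i => List.replicate i 0 ++ List.replicate (labels.length - i) 1

-- ===== PRECONDITION & SPEC =====
def Spec_monotonic_labels (labels : List Int) (out : List Int) : Prop := out = monotonic_labels_alt labels
instance (labels : List Int) (out : List Int) : Decidable (Spec_monotonic_labels labels out) := by unfold Spec_monotonic_labels; infer_instance

-- ===== CLAIM (what is proved, stated in full; the proofs are below) =====
def Claim_equal_monotonic_labels : Prop := ∀ (labels : List Int), Dom_monotonic_labels labels → Spec_monotonic_labels labels (monotonic_labels labels)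

-- ===== LEMMAS AND PROOFS =====

-- recursive reading of A's loop
def pvGo (labels : List Int) (flag : Bool) : List Int :=
  match labels with
  | [] => []
  | l :: ls =>
    let hp := if l == 1 then true else flag
    (if hp then (1 : Int) else 0) :: pvGo ls hp

theorem pvFold_eq_go (labels : List Int) (acc : List Int) (flag : Bool) :
    (labels.foldl
      (fun (st : List Int × Bool) lab =>
        let hp := if lab == 1 then true else st.2
        (st.1 ++ [if hp then 1 else 0], hp))
      (acc, flag)).1 = acc ++ pvGo labels flag := by
  induction labels generalizing acc flag with
  | nil => simp [pvGo]
  | cons l ls ih =>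
    simp only [List.foldl_cons, pvGo]
    rw [ih]
    simp

theorem pvGo_true (labels : List Int) :
    pvGo labels true = List.replicate labels.length 1 := by
  induction labels with
  | nil => rfl
  | cons l ls ih => simp [pvGo, ih, List.replicate_succ]

theorem pvGo_false (labels : List Int) :
    pvGo labels false = monotonic_labels_alt labels := by
  induction labels with
  | nil => rfl
  | cons l ls ih =>
    by_cases h : l = 1
    · simp [pvGo, h, monotonic_labels_alt, List.findIdx?_cons, pvGo_true,
        List.replicate_succ]
    · have hb : (l == 1) = false := by simp [h]
      simp only [pvGo, hb, if_false, Bool.false_eq_true, ih,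
        monotonic_labels_alt, List.findIdx?_cons]
      cases hfi : ls.findIdx? (fun l => l == 1) with
      | none => simp [List.replicate_succ]
      | some i => simp [List.replicate_succ]

-- ===== VERDICT (by name: the statement is the Claim_ definition above) =====
theorem monotonic_labels_spec : Claim_equal_monotonic_labels := by
  intro labels _
  show monotonic_labels labels = monotonic_labels_alt labels
  unfold monotonic_labels
  rw [pvFold_eq_go, pvGo_false, List.nil_append]
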